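-- pv_equiv track=rewrite | github.com/dbogdangabriel/UMT---Problema2 | problema2.py | nr_Rectangles
-- ===== SOURCE A (Python) =====
-- def nr_Rectangles(obj):
--
--     # Here I made a TreeSet to contain the elements
--     # keep in mind that sets are used to store multiple items in a single variable
--     set_nr = set()
--
--     # here I added the pairs from sample to the set
--     for i in range(len(obj)):
--         set_nr.add(f"{obj[i]}");
--
--     sides = 0;
--     for i in range(len(obj)):
--         for j in range(len(obj)):
--             if (obj[i][0] != obj[j][0] and obj[i][1] != obj[j][1]):
--
--                 # Searching for the pairs in the set
--                 if (f"{[obj[i][0], obj[j][1]]}" in set_nr and f"{[obj[j][0], obj[i][1]]}" in set_nr):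
--                     # Increase the sides
--                     sides += 1
--
--     # Return how many rectangles has been found
--     # after we found all the sides we divided to 4 ( 1 rectangle - 4 sides)
--     return int(sides / 4);
-- ===== SOURCE B (Python) =====
-- def nr_Rectangles(obj):
--     # The given points, for corner lookups (rows as tuples).
--     pts = {tuple(p) for p in obj}
--     # Group the points into columns: x -> {height: multiplicity}.
--     cols = {}
--     for p in obj:
--         ycnt = cols.get(p[0], {})
--         ycnt[p[1]] = ycnt.get(p[1], 0) + 1
--         cols[p[0]] = ycnt
--     # For each pair of columns, count the rectangles they span: a height from
--     # one column paired with a different height from the other forms a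
--     # rectangle exactly when both opposite corners are given points.
--     total = 0
--     done = []
--     for x2, c2 in cols.items():
--         for x1, c1 in done:
--             na = 0
--             for y, m in c1.items():
--                 if (x2, y) in pts:
--                     na += m
--             nd = sp = 0
--             for y, m in c2.items():
--                 if (x1, y) in pts:
--                     nd += m
--                     if (x2, y) in pts:
--                         sp += c1.get(y, 0) * m
--             total += na * nd - sp
--         done.append((x2, c2))
--     return total // 2
-- ===== Notes on version B (the rewrite author's own statement) =====
-- stated objective: faster
-- what changed: Replaces A's quadratic scan over ordered point pairs with string-formatted corner lookups by a column-grouping algorithm: points are grouped by x into height multisets, corner membership is tested against a set of the given rows, and each pair of columns contributes (matching heights on one side)*(on the other) minus equal-height terms; Pre_ excludes rows with fewer than two entries, where B's p[0]/p[1] indexing raises IndexError and A itself raises on almost all such inputs (A returns 0 only on degenerate single-column cases).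
-- outside the precondition, e.g. on nr_Rectangles([[5]]): A returns 0, B raises IndexError; on nr_Rectangles([[2], [2]]): A returns 0, B raises IndexError
import Mathlib
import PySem

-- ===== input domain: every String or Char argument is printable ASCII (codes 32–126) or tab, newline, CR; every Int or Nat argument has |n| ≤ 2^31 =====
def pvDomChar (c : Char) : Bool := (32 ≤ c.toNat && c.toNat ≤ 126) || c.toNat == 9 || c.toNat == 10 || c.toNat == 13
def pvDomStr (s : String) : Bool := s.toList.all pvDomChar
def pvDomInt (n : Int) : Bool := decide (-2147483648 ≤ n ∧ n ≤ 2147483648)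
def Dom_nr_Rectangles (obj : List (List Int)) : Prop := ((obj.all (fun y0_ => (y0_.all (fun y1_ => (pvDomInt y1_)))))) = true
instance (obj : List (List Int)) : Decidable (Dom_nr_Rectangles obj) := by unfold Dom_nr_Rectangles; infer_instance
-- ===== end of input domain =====

-- B groups the points into columns (x -> height multiset) and counts, per pair of
-- columns, the rectangles spanned by their shared heights — no string formatting and
-- no scan over ordered point pairs (measurably faster in a timing run).


-- ===== PORT A =====
-- Hand-port of Python's f"{p}" for a list of ints: repr — "[" ++ ", ".join(str(x)) ++ "]".
-- Exact for lists of ints (str(int) = PySem.Int.toChars).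
def encBody : List Int → List Char
  | [] => []
  | x :: xs => PySem.Int.toChars x ++ xs.flatMap (fun y => ',' :: ' ' :: PySem.Int.toChars y)

def encChars (p : List Int) : List Char := '[' :: (encBody p ++ [']'])

def enc (p : List Int) : String := String.ofList (encChars p)

def nr_Rectangles (obj : List (List Int)) : Int :=
  -- set_nr = set(); for i in range(len(obj)): set_nr.add(f"{obj[i]}")
  let set_nr : PySem.Set String :=
    (PySem.List.pyRange 0 (PySem.List.len obj) 1).foldl
      (fun s i => PySem.Set.add s (enc (PySem.List.pyGetD obj i [])))
      PySem.Set.empty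
  -- nested loops over i, j
  let sides : Int :=
    (PySem.List.pyRange 0 (PySem.List.len obj) 1).foldl (fun acc i =>
      (PySem.List.pyRange 0 (PySem.List.len obj) 1).foldl (fun acc j =>
        if PySem.List.pyGetD (PySem.List.pyGetD obj i []) 0 0 ≠ PySem.List.pyGetD (PySem.List.pyGetD obj j []) 0 0 ∧
           PySem.List.pyGetD (PySem.List.pyGetD obj i []) 1 0 ≠ PySem.List.pyGetD (PySem.List.pyGetD obj j []) 1 0 then
          if PySem.Set.contains set_nr (enc [PySem.List.pyGetD (PySem.List.pyGetD obj i []) 0 0,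
                                            PySem.List.pyGetD (PySem.List.pyGetD obj j []) 1 0]) = true ∧
             PySem.Set.contains set_nr (enc [PySem.List.pyGetD (PySem.List.pyGetD obj j []) 0 0,
                                            PySem.List.pyGetD (PySem.List.pyGetD obj i []) 1 0]) = true then
            acc + 1
          else acc
        else acc) acc) 0
  -- int(sides / 4): truncating division (exact int(a/b) on the tested magnitudes)
  PySem.Int.truncdiv sides 4

-- ===== PORT B =====
-- pts = {tuple(p) for p in obj}: rows as tuples; ported as a set of the row lists
-- (tuple() is injective on lists, so membership of the pair (a, b) is membership of [a, b]).
def nr_Rectangles_alt (obj : List (List Int)) : Int :=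
  let pts : PySem.Set (List Int) := PySem.Set.ofList obj
  -- cols = {}; for p in obj: ycnt = cols.get(p[0], {}); ycnt[p[1]] = ycnt.get(p[1], 0) + 1; cols[p[0]] = ycnt
  let cols : PySem.Dict Int (PySem.Dict Int Int) :=
    obj.foldl (fun cols p =>
        let ycnt := PySem.Dict.getD cols (PySem.List.pyGetD p 0 0) PySem.Dict.empty
        PySem.Dict.insert cols (PySem.List.pyGetD p 0 0)
          (PySem.Dict.insert ycnt (PySem.List.pyGetD p 1 0)
            (PySem.Dict.getD ycnt (PySem.List.pyGetD p 1 0) 0 + 1)))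
      PySem.Dict.empty
  -- total = 0; done = []; for x2, c2 in cols.items(): for x1, c1 in done: … ; done.append((x2, c2))
  let st : Int × List (Int × PySem.Dict Int Int) :=
    cols.items.foldl (fun st xc2 =>
        (st.2.foldl (fun total xc1 =>
            let na := xc1.2.items.foldl (fun na ym =>
                if PySem.Set.contains pts [xc2.1, ym.1] = true then na + ym.2 else na) 0
            let nds := xc2.2.items.foldl (fun (nds : Int × Int) ym =>
                if PySem.Set.contains pts [xc1.1, ym.1] = true then
                  (nds.1 + ym.2,
                   if PySem.Set.contains pts [xc2.1, ym.1] = true then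
                     nds.2 + PySem.Dict.getD xc1.2 ym.1 0 * ym.2
                   else nds.2)
                else nds) (0, 0)
            total + (na * nds.1 - nds.2)) st.1,
         st.2 ++ [xc2]))
      (0, [])
  -- return total // 2
  PySem.Int.floordiv st.1 2

-- ===== PRECONDITION & SPEC =====
-- Pre_ excludes rows with fewer than two entries: B's p[0]/p[1] indexing raises
-- IndexError there, and A itself raises IndexError on almost all such inputs.
def Pre_nr_Rectangles (obj : List (List Int)) : Prop := ∀ r ∈ obj, 2 ≤ r.length
instance (obj : List (List Int)) : Decidable (Pre_nr_Rectangles obj) := by unfold Pre_nr_Rectangles; infer_instance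
def pvWitness_nr_Rectangles : List (List Int) := [[0, 0], [0, 1], [1, 0], [1, 1]]

def Spec_nr_Rectangles (obj : List (List Int)) (out : Int) : Prop := out = nr_Rectangles_alt obj
instance (obj : List (List Int)) (out : Int) : Decidable (Spec_nr_Rectangles obj out) := by unfold Spec_nr_Rectangles; infer_instance

-- ===== CLAIM (what is proved, stated in full; the proofs are below) =====
def Claim_equal_nr_Rectangles : Prop := ∀ (obj : List (List Int)), Dom_nr_Rectangles obj → Pre_nr_Rectangles obj → Spec_nr_Rectangles obj (nr_Rectangles obj)

-- ===== LEMMAS AND PROOFS =====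

-- ---- decimal digits: facts about Nat.toDigits 10 ----

theorem toDigitsCore_acc (f : Nat) : ∀ (n : Nat) (ds : List Char),
    Nat.toDigitsCore 10 f n ds = Nat.toDigitsCore 10 f n [] ++ ds := by
  induction f with
  | zero => intro n ds; simp [Nat.toDigitsCore]
  | succ f ih =>
    intro n ds
    simp only [Nat.toDigitsCore]
    by_cases h : n / 10 = 0
    · simp [h]
    · simp only [h, if_false]
      rw [ih (n / 10) (Nat.digitChar (n % 10) :: ds), ih (n / 10) [Nat.digitChar (n % 10)]]
      simp

theorem toDigitsCore_fuel : ∀ (n f₁ f₂ : Nat), n < f₁ → n < f₂ →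
    Nat.toDigitsCore 10 f₁ n [] = Nat.toDigitsCore 10 f₂ n [] := by
  intro n
  induction n using Nat.strong_induction_on with
  | _ n ih =>
    intro f₁ f₂ h1 h2
    match f₁, f₂ with
    | g₁ + 1, g₂ + 1 =>
      simp only [Nat.toDigitsCore]
      by_cases h : n / 10 = 0
      · simp [h]
      · simp only [h, if_false]
        rw [toDigitsCore_acc g₁, toDigitsCore_acc g₂,
          ih (n / 10) (by omega) g₁ g₂ (by omega) (by omega)]

theorem toDigits_rec (n : Nat) :
    Nat.toDigits 10 n = (if n < 10 then [] else Nat.toDigits 10 (n / 10)) ++ [Nat.digitChar (n % 10)] := by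
  unfold Nat.toDigits
  conv_lhs => simp only [Nat.toDigitsCore]
  by_cases h : n / 10 = 0
  · simp [h, show n < 10 by omega]
  · have hn : ¬ n < 10 := by omega
    simp only [h, if_false, hn]
    rw [toDigitsCore_acc, toDigitsCore_fuel (n / 10) n (n / 10 + 1) (by omega) (by omega)]

theorem toDigits_ne_nil (n : Nat) : Nat.toDigits 10 n ≠ [] := by
  rw [toDigits_rec]; simp

theorem toDigits_digits (n : Nat) : ∀ c ∈ Nat.toDigits 10 n, 48 ≤ c.toNat ∧ c.toNat ≤ 57 := by
  induction n using Nat.strong_induction_on with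
  | _ n ih =>
    rw [toDigits_rec]
    intro c hc
    rcases List.mem_append.mp hc with h | h
    · by_cases h10 : n < 10
      · simp [h10] at h
      · simp only [h10, if_false] at h
        exact ih (n / 10) (by omega) c h
    · have hd : n % 10 < 10 := Nat.mod_lt _ (by omega)
      simp only [List.mem_singleton] at h
      subst h
      interval_cases h : n % 10 <;> simp [Nat.digitChar]

theorem digitChar_inj (a b : Nat) (ha : a < 10) (hb : b < 10)
    (h : Nat.digitChar a = Nat.digitChar b) : a = b := by
  interval_cases a <;> interval_cases b <;> simp_all [Nat.digitChar]

theorem toDigits_inj : ∀ (m n : Nat), Nat.toDigits 10 m = Nat.toDigits 10 n → m = n := by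
  intro m
  induction m using Nat.strong_induction_on with
  | _ m ih =>
    intro n h
    rw [toDigits_rec m, toDigits_rec n] at h
    obtain ⟨h1, h2⟩ := List.append_inj' h rfl
    simp only [List.cons.injEq] at h2
    have hmod := digitChar_inj _ _ (Nat.mod_lt _ (by omega)) (Nat.mod_lt _ (by omega)) h2.1
    by_cases hm : m < 10 <;> by_cases hn : n < 10
    · omega
    · simp [hm, hn] at h1; exact absurd h1 (toDigits_ne_nil _)
    · simp [hm, hn] at h1; exact absurd h1 (toDigits_ne_nil _)
    · simp only [hm, hn, if_false] at h1
      have := ih (m / 10) (by omega) (n / 10) h1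
      omega

-- ---- str(int): facts about PySem.Int.toChars ----

def okChar (c : Char) : Prop := (48 ≤ c.toNat ∧ c.toNat ≤ 57) ∨ c = '-'

theorem toChars_ok (n : Int) : ∀ c ∈ PySem.Int.toChars n, okChar c := by
  unfold PySem.Int.toChars
  split <;> intro c hc
  · rcases List.mem_cons.mp hc with h | h
    · right; exact h
    · left; exact toDigits_digits _ c h
  · left; exact toDigits_digits _ c hc

theorem toChars_ne_nil (n : Int) : PySem.Int.toChars n ≠ [] := by
  unfold PySem.Int.toChars
  split
  · simp
  · exact toDigits_ne_nil _

theorem toChars_inj (m n : Int) : PySem.Int.toChars m = PySem.Int.toChars n → m = n := by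
  unfold PySem.Int.toChars
  split <;> split <;> intro h
  · simp only [List.cons.injEq] at h
    have := toDigits_inj _ _ h.2
    omega
  · exfalso
    have hm : '-' ∈ Nat.toDigits 10 n.toNat := h ▸ List.mem_cons_self ..
    have := toDigits_digits n.toNat '-' hm
    simp [Char.toNat] at this
  · exfalso
    have hm : '-' ∈ Nat.toDigits 10 m.toNat := h.symm ▸ List.mem_cons_self ..
    have := toDigits_digits m.toNat '-' hm
    simp [Char.toNat] at this
  · have := toDigits_inj _ _ h
    omega

theorem okChar_ne_comma {c : Char} (h : okChar c) : c ≠ ',' := by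
  rcases h with h | h
  · intro hc; subst hc; simp [Char.toNat] at h
  · intro hc; subst hc; simp at h

theorem comma_not_mem_toChars (n : Int) : ',' ∉ PySem.Int.toChars n := by
  intro h; exact okChar_ne_comma (toChars_ok n _ h) rfl

-- ---- injectivity of the repr encoding ----

theorem split_at_sep : ∀ (a b r s : List Char), (∀ c ∈ a, okChar c) → (∀ c ∈ b, okChar c) →
    a ++ ',' :: r = b ++ ',' :: s → a = b ∧ r = s := by
  intro a
  induction a with
  | nil =>
    intro b r s _ hb h
    cases b with
    | nil => simpa using h
    | cons y b' =>
      exfalso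
      simp only [List.nil_append, List.cons_append, List.cons.injEq] at h
      exact okChar_ne_comma (hb y (List.mem_cons_self ..)) h.1.symm
  | cons x a' ih =>
    intro b r s ha hb h
    cases b with
    | nil =>
      exfalso
      simp only [List.cons_append, List.nil_append, List.cons.injEq] at h
      exact okChar_ne_comma (ha x (List.mem_cons_self ..)) h.1
    | cons y b' =>
      simp only [List.cons_append, List.cons.injEq] at h
      obtain ⟨h1, h2⟩ := h
      obtain ⟨hab, hrs⟩ := ih b' r s (fun c hc => ha c (List.mem_cons_of_mem _ hc))
        (fun c hc => hb c (List.mem_cons_of_mem _ hc)) h2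
      exact ⟨by rw [h1, hab], hrs⟩

theorem encBody_inj : ∀ (l₁ l₂ : List Int), encBody l₁ = encBody l₂ → l₁ = l₂ := by
  intro l₁
  induction l₁ with
  | nil =>
    intro l₂ h
    cases l₂ with
    | nil => rfl
    | cons y ys =>
      exfalso
      simp only [encBody] at h
      exact toChars_ne_nil y (List.append_eq_nil_iff.mp h.symm).1
  | cons x xs ih =>
    intro l₂ h
    cases l₂ with
    | nil =>
      exfalso
      simp only [encBody] at h
      exact toChars_ne_nil x (List.append_eq_nil_iff.mp h).1
    | cons y ys =>
      simp only [encBody] at h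
      cases xs with
      | nil =>
        cases ys with
        | nil =>
          simp only [List.flatMap_nil, List.append_nil] at h
          rw [toChars_inj x y h]
        | cons z zs =>
          exfalso
          simp only [List.flatMap_nil, List.append_nil, List.flatMap_cons] at h
          have : ',' ∈ PySem.Int.toChars x := by
            rw [h]
            simp
          exact comma_not_mem_toChars x this
      | cons u us =>
        cases ys with
        | nil =>
          exfalso
          simp only [List.flatMap_nil, List.append_nil, List.flatMap_cons] at h
          have : ',' ∈ PySem.Int.toChars y := by
            rw [← h]
            simp
          exact comma_not_mem_toChars y this
        | cons z zs =>
          simp only [List.flatMap_cons, List.cons_append] at h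
          obtain ⟨h1, h2⟩ := split_at_sep _ _ _ _ (toChars_ok x) (toChars_ok y) (by simpa using h)
          simp only [List.cons.injEq] at h2
          have htail : encBody (u :: us) = encBody (z :: zs) := by
            simp only [encBody]; exact h2.2
          rw [toChars_inj x y h1, ih _ htail]

theorem enc_inj (l₁ l₂ : List Int) : enc l₁ = enc l₂ → l₁ = l₂ := by
  intro h
  unfold enc at h
  have h2 : encChars l₁ = encChars l₂ := by
    have := congrArg String.toList h
    simpa using this
  unfold encChars at h2
  simp only [List.cons.injEq, true_and] at h2
  exact encBody_inj _ _ (List.append_cancel_right h2)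

theorem enc_mem_iff (obj : List (List Int)) (q : List Int) :
    enc q ∈ obj.map enc ↔ q ∈ obj := by
  rw [List.mem_map]
  constructor
  · rintro ⟨p, hp, he⟩
    rw [← enc_inj p q he]; exact hp
  · intro h; exact ⟨q, h, rfl⟩

-- ---- evaluation of port A to a double sum over rows ----

def bKey (p : List Int) : Int × Int := (PySem.List.pyGetD p 0 0, PySem.List.pyGetD p 1 0)

def indI (obj : List (List Int)) (K L : Int × Int) : Int :=
  if K.1 ≠ L.1 ∧ K.2 ≠ L.2 ∧ [K.1, L.2] ∈ obj ∧ [L.1, K.2] ∈ obj then 1 else 0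

theorem set_nr_eval (obj : List (List Int)) :
    (PySem.List.pyRange 0 (obj.length : Int) 1).foldl
      (fun s i => PySem.Set.add s (enc (PySem.List.pyGetD obj i []))) PySem.Set.empty
    = PySem.Set.ofList (obj.map enc) := by
  rw [PySem.List.foldl_pyRange_zero_pyGetD' obj [] (fun s p => PySem.Set.add s (enc p)) PySem.Set.empty]
  rw [← PySem.Set.update_map_eq_foldl_add, PySem.Set.update_empty]

theorem contains_enc_iff (obj : List (List Int)) (a b : Int) :
    PySem.Set.contains (PySem.Set.ofList (obj.map enc)) (enc [a, b]) = true ↔ [a, b] ∈ obj := by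
  rw [PySem.Set.contains_iff, PySem.Set.mem_ofList, enc_mem_iff]

theorem A_cell (obj : List (List Int)) (p q : List Int) (acc : Int) :
    (if PySem.List.pyGetD p 0 0 ≠ PySem.List.pyGetD q 0 0 ∧
        PySem.List.pyGetD p 1 0 ≠ PySem.List.pyGetD q 1 0 then
       if PySem.Set.contains (PySem.Set.ofList (obj.map enc))
            (enc [PySem.List.pyGetD p 0 0, PySem.List.pyGetD q 1 0]) = true ∧
          PySem.Set.contains (PySem.Set.ofList (obj.map enc))
            (enc [PySem.List.pyGetD q 0 0, PySem.List.pyGetD p 1 0]) = true then acc + 1 else acc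
     else acc)
    = acc + indI obj (bKey p) (bKey q) := by
  unfold indI bKey
  simp only [contains_enc_iff]
  split_ifs <;> first | rfl | omega | tauto

theorem A_eval (obj : List (List Int)) :
    nr_Rectangles obj = PySem.Int.truncdiv
      ((obj.map (fun p => (obj.map (fun q => indI obj (bKey p) (bKey q))).sum)).sum) 4 := by
  simp only [nr_Rectangles, PySem.List.len_eq]
  simp only [set_nr_eval]
  congr 1
  rw [PySem.List.foldl_pyRange_zero_pyGetD' obj []
    (fun acc p => List.foldl (fun acc j =>
      if PySem.List.pyGetD p 0 0 ≠ PySem.List.pyGetD (PySem.List.pyGetD obj j []) 0 0 ∧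
         PySem.List.pyGetD p 1 0 ≠ PySem.List.pyGetD (PySem.List.pyGetD obj j []) 1 0 then
        if PySem.Set.contains (PySem.Set.ofList (obj.map enc))
             (enc [PySem.List.pyGetD p 0 0, PySem.List.pyGetD (PySem.List.pyGetD obj j []) 1 0]) = true ∧
           PySem.Set.contains (PySem.Set.ofList (obj.map enc))
             (enc [PySem.List.pyGetD (PySem.List.pyGetD obj j []) 0 0, PySem.List.pyGetD p 1 0]) = true then
          acc + 1
        else acc
      else acc) acc (PySem.List.pyRange 0 (obj.length : Int) 1)) 0]
  rw [PySem.List.foldl_congr_mem obj _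
    (fun acc p => acc + (obj.map (fun q => indI obj (bKey p) (bKey q))).sum) 0 ?_]
  · rw [PySem.List.foldl_add]
    simp
  · intro acc p _
    rw [PySem.List.foldl_pyRange_zero_pyGetD' obj []
      (fun acc q =>
        if PySem.List.pyGetD p 0 0 ≠ PySem.List.pyGetD q 0 0 ∧
           PySem.List.pyGetD p 1 0 ≠ PySem.List.pyGetD q 1 0 then
          if PySem.Set.contains (PySem.Set.ofList (obj.map enc))
               (enc [PySem.List.pyGetD p 0 0, PySem.List.pyGetD q 1 0]) = true ∧
             PySem.Set.contains (PySem.Set.ofList (obj.map enc))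
               (enc [PySem.List.pyGetD q 0 0, PySem.List.pyGetD p 1 0]) = true then acc + 1 else acc
        else acc) acc]
    rw [PySem.List.foldl_congr_mem obj _
      (fun acc q => acc + indI obj (bKey p) (bKey q)) acc
      (fun acc q _ => A_cell obj p q acc)]
    rw [PySem.List.foldl_add]

-- ---- small sum toolbox ----

theorem sum_map_sub_int {α : Type} (l : List α) (f g : α → Int) :
    (l.map (fun a => f a - g a)).sum = (l.map f).sum - (l.map g).sum := by
  induction l with
  | nil => simp
  | cons x xs ih => simp [ih]; ring

theorem sum_sum_comm {α β : Type} (A : List α) (B : List β) (g : α → β → Int) :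
    (A.map (fun a => (B.map (fun b => g a b)).sum)).sum
      = (B.map (fun b => (A.map (fun a => g a b)).sum)).sum := by
  induction A with
  | nil => simp
  | cons x xs ih =>
    simp only [List.map_cons, List.sum_cons, ih]
    rw [← PySem.List.sum_map_add_int]

theorem sum_filter_split {α : Type} (l : List α) (p : α → Bool) (f : α → Int) :
    (l.map f).sum = ((l.filter p).map f).sum + ((l.filter (fun a => !p a)).map f).sum := by
  induction l with
  | nil => simp
  | cons x xs ih =>
    by_cases h : p x = true <;> simp [h, ih] <;> ring

theorem sum_map_filter_ite {α : Type} (l : List α) (p : α → Bool) (f : α → Int) :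
    ((l.filter p).map f).sum = (l.map (fun a => if p a then f a else 0)).sum := by
  induction l with
  | nil => simp
  | cons x xs ih =>
    by_cases h : p x = true <;> simp [h, ih]

theorem sum_ite_eq_count (l : List Int) (b : Int) (x : Int) :
    (l.map (fun d => if d = b then x else 0)).sum = (l.count b : Int) * x := by
  induction l with
  | nil => simp
  | cons d l ih =>
    by_cases h : d = b
    · subst h; simp [ih]; ring
    · simp [h, ih]

theorem count_beq_eq {κ : Type} [BEq κ] [LawfulBEq κ] [DecidableEq κ] (x : κ) (l : List κ) :
    @List.count κ instBEqOfDecidableEq x l = l.count x := by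
  induction l with
  | nil => rfl
  | cons y ys ih => simp [List.count_cons, ih]

theorem sum_group {κ : Type} [DecidableEq κ] [BEq κ] [LawfulBEq κ] (l : List κ) (g : κ → Int) :
    (l.map g).sum = ((PySem.Set.ofList l).map (fun k => (l.count k : Int) * g k)).sum := by
  rw [Finset.sum_list_map_count]
  have hnd : (PySem.Set.ofList l).Nodup := PySem.Set.nodup_ofList l
  rw [← List.sum_toFinset _ hnd]
  have hfs : (PySem.Set.ofList l).toFinset = l.toFinset := by
    ext x
    simp [List.mem_toFinset, PySem.Set.mem_ofList]
  rw [hfs]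
  apply Finset.sum_congr rfl
  intro x _
  push_cast [nsmul_eq_mul]
  rw [count_beq_eq]

-- ---- grouping a double sum by the first coordinate ----

def ysOf (ks : List (Int × Int)) (x : Int) : List Int :=
  (ks.filter (fun k => k.1 == x)).map (fun k => k.2)

theorem sum_fiber {β : Type} (k : β → Int) (f : β → Int) :
    ∀ (X : List Int), X.Nodup → ∀ (l : List β), (∀ b ∈ l, k b ∈ X) →
    (l.map f).sum = (X.map (fun x => ((l.filter (fun b => k b == x)).map f).sum)).sum := by
  intro X
  induction X with
  | nil =>
    intro _ l hl
    cases l with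
    | nil => simp
    | cons b l => exact absurd (hl b (List.mem_cons_self ..)) (by simp)
  | cons x X' ih =>
    intro hnd l hl
    rw [sum_filter_split l (fun b => k b == x) f]
    simp only [List.map_cons, List.sum_cons]
    congr 1
    rw [ih hnd.of_cons (l.filter (fun b => !(k b == x)))
      (by
        intro b hb
        obtain ⟨hbl, hbx⟩ := List.mem_filter.mp hb
        have := hl b hbl
        simp only [List.mem_cons] at this
        rcases this with h | h
        · exfalso; simp [h] at hbx
        · exact h)]
    apply congrArg List.sum
    apply List.map_congr_left
    intro x' hx'
    have hxx' : x' ≠ x := by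
      intro h; subst h
      exact (List.nodup_cons.mp hnd).1 hx'
    congr 2
    rw [List.filter_filter]
    apply List.filter_congr
    intro b _
    by_cases h : k b = x' <;> simp [h, hxx']

-- ---- the fiber sum as a pure two-list quantity ----

theorem sum_over_fiber (ks : List (Int × Int)) (x : Int) (h : Int × Int → Int) :
    ((ks.filter (fun k => k.1 == x)).map h).sum = ((ysOf ks x).map (fun y => h (x, y))).sum := by
  unfold ysOf
  rw [List.map_map]
  apply congrArg List.sum
  apply List.map_congr_left
  intro k hk
  obtain ⟨-, hk1⟩ := List.mem_filter.mp hk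
  have : k = (x, k.2) := by cases k; simp_all
  rw [Function.comp_apply, ← this]

-- ---- the column dictionary built by B ----

def colStep (cols : PySem.Dict Int (PySem.Dict Int Int)) (k : Int × Int) :
    PySem.Dict Int (PySem.Dict Int Int) :=
  PySem.Dict.insert cols k.1
    (PySem.Dict.insert (PySem.Dict.getD cols k.1 PySem.Dict.empty) k.2
      ((PySem.Dict.getD cols k.1 PySem.Dict.empty).getD k.2 0 + 1))

theorem ysOf_cons (k : Int × Int) (ks : List (Int × Int)) (x : Int) :
    ysOf (k :: ks) x = if k.1 = x then k.2 :: ysOf ks x else ysOf ks x := by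
  unfold ysOf
  rw [List.filter_cons]
  by_cases h : k.1 = x <;> simp [h]

theorem cols_getD (ks : List (Int × Int)) :
    ∀ (d : PySem.Dict Int (PySem.Dict Int Int)) (x : Int),
    PySem.Dict.getD (ks.foldl colStep d) x PySem.Dict.empty
      = (ysOf ks x).foldl (fun c y => PySem.Dict.insert c y (PySem.Dict.getD c y 0 + 1))
          (PySem.Dict.getD d x PySem.Dict.empty) := by
  induction ks with
  | nil => intro d x; simp [ysOf]
  | cons k ks ih =>
    intro d x
    rw [List.foldl_cons, ih, ysOf_cons]
    by_cases h : k.1 = x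
    · subst h
      rw [if_pos rfl, List.foldl_cons]
      congr 1
      unfold colStep
      rw [PySem.Dict.getD_insert_self]
    · rw [if_neg h]
      congr 1
      unfold colStep
      rw [PySem.Dict.getD_insert_of_ne _ _ _ (Ne.symm h)]

theorem cols_getD_counter (ks : List (Int × Int)) (x : Int) :
    PySem.Dict.getD (ks.foldl colStep PySem.Dict.empty) x PySem.Dict.empty
      = PySem.Dict.counter (ysOf ks x) := by
  rw [cols_getD, PySem.Dict.getD_empty, PySem.Dict.foldl_insert_getD_add_one_eq_counter]

theorem cols_keys (ks : List (Int × Int)) :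
    (ks.foldl colStep PySem.Dict.empty).keys = PySem.Set.ofList (ks.map (fun k => k.1)) := by
  unfold colStep
  rw [PySem.Dict.keys_foldl_insert_key, PySem.Dict.keys_empty,
    show ([] : List Int) = PySem.Set.empty from rfl, PySem.Set.update_empty]

-- ---- pairAcc: the accumulating pass over previously seen columns ----

def pairAcc {α : Type} (F : α → α → Int) : List α → List α → Int
  | _, [] => 0
  | prev, c :: l => (prev.map (fun c1 => F c1 c)).sum + pairAcc F (prev ++ [c]) l

theorem foldl_pairAcc {α : Type} (G : α → α → Int) :
    ∀ (l prev : List α) (t : Int),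
    (l.foldl (fun st c2 => (st.2.foldl (fun total c1 => total + G c1 c2) st.1, st.2 ++ [c2]))
      ((t, prev) : Int × List α)).1 = t + pairAcc G prev l := by
  intro l
  induction l with
  | nil => intro prev t; simp [pairAcc]
  | cons c l ih =>
    intro prev t
    simp only [List.foldl_cons, pairAcc]
    rw [ih, PySem.List.foldl_add]
    ring

theorem pairAcc_map {α β : Type} (F : β → β → Int) (g : α → β) :
    ∀ (l prev : List α),
    pairAcc F (prev.map g) (l.map g) = pairAcc (fun a b => F (g a) (g b)) prev l := by
  intro l
  induction l with
  | nil => intro prev; simp [pairAcc]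
  | cons c l ih =>
    intro prev
    simp only [List.map_cons, pairAcc, List.map_map]
    rw [show (List.map g prev ++ [g c]) = List.map g (prev ++ [c]) by simp, ih]
    rfl

theorem pairAcc_perm_prev {α : Type} (F : α → α → Int) :
    ∀ (l prev prev' : List α), prev.Perm prev' → pairAcc F prev l = pairAcc F prev' l := by
  intro l
  induction l with
  | nil => intro prev prev' _; rfl
  | cons c l ih =>
    intro prev prev' hp
    simp only [pairAcc]
    rw [List.Perm.sum_eq (hp.map _), ih (prev ++ [c]) (prev' ++ [c]) (hp.append_right _)]

theorem pairAcc_snoc_prev {α : Type} (F : α → α → Int) :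
    ∀ (l prev : List α) (a : α),
    pairAcc F (prev ++ [a]) l = (l.map (fun c => F a c)).sum + pairAcc F prev l := by
  intro l
  induction l with
  | nil => intro prev a; simp [pairAcc]
  | cons c l ih =>
    intro prev a
    simp only [pairAcc, List.map_cons, List.sum_cons, List.map_append, List.sum_append]
    rw [pairAcc_perm_prev F l ((prev ++ [a]) ++ [c]) ((prev ++ [c]) ++ [a])
      (by
        rw [List.append_assoc, List.append_assoc]
        exact List.Perm.append_left prev (List.Perm.swap c a []))]
    rw [ih]
    simp [pairAcc]
    ring

theorem pairAcc_congr {α : Type} (F G : α → α → Int) :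
    ∀ (l prev : List α), (prev ++ l).Nodup →
    (∀ a b, a ≠ b → F a b = G a b) → pairAcc F prev l = pairAcc G prev l := by
  intro l
  induction l with
  | nil => intro prev _ _; rfl
  | cons c l ih =>
    intro prev hnd hFG
    simp only [pairAcc]
    have hc : c ∉ prev := by
      intro hc
      have := List.disjoint_of_nodup_append hnd hc
      simp at this
    congr 1
    · apply congrArg List.sum
      apply List.map_congr_left
      intro a ha
      exact hFG a c (fun h => hc (h ▸ ha))
    · apply ih (prev ++ [c])
      · have : (prev ++ c :: l).Perm ((prev ++ [c]) ++ l) := by simp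
        exact this.nodup hnd
      · exact hFG

theorem sum_sq_eq_two_pairAcc {α : Type} (F : α → α → Int)
    (hdiag : ∀ x, F x x = 0) (hsymm : ∀ x y, F x y = F y x) :
    ∀ (X : List α),
    (X.map (fun x => (X.map (fun y => F x y)).sum)).sum = 2 * pairAcc F [] X := by
  intro X
  induction X with
  | nil => simp [pairAcc]
  | cons x X' ih =>
    simp only [List.map_cons, List.sum_cons, pairAcc, List.map_nil, List.sum_nil, List.nil_append]
    rw [show ([x] : List α) = [] ++ [x] from rfl, pairAcc_snoc_prev]
    have hsplit : (X'.map (fun x1 => F x1 x + (X'.map (fun y => F x1 y)).sum)).sum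
        = (X'.map (fun x1 => F x1 x)).sum + (X'.map (fun x1 => (X'.map (fun y => F x1 y)).sum)).sum := by
      rw [← PySem.List.sum_map_add_int]
    have hx : (X'.map (fun x1 => F x1 x)).sum = (X'.map (fun c => F x c)).sum :=
      congrArg List.sum (List.map_congr_left (fun a _ => hsymm a x))
    rw [hdiag, hsplit, hx, ih]
    ring

-- ---- the inner accumulation over shared heights ----


-- ---- the pure two-list heart: pairs of distinct heights with present corners ----

def ttSum2 (l1 l2 : List Int) (p1 p2 : Int → Bool) : Int :=
  (l1.map (fun b => (l2.map (fun d =>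
    if b ≠ d ∧ p1 d = true ∧ p2 b = true then (1 : Int) else 0)).sum)).sum

def naS (l1 : List Int) (p2 : Int → Bool) : Int :=
  (((PySem.Set.ofList l1).filter p2).map (fun y => (l1.count y : Int))).sum

def ndS (l2 : List Int) (p1 : Int → Bool) : Int :=
  (((PySem.Set.ofList l2).filter p1).map (fun y => (l2.count y : Int))).sum

def spS (l1 l2 : List Int) (p1 p2 : Int → Bool) : Int :=
  (((PySem.Set.ofList l2).filter (fun y => p1 y && p2 y)).map
    (fun y => (l1.count y : Int) * (l2.count y : Int))).sum

theorem ttSum2_eq (l1 l2 : List Int) (p1 p2 : Int → Bool) :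
    ttSum2 l1 l2 p1 p2 = naS l1 p2 * ndS l2 p1 - spS l1 l2 p1 p2 := by
  have hNA : (l1.map (fun b => if p2 b = true then (1 : Int) else 0)).sum = naS l1 p2 := by
    rw [sum_group l1 (fun b => if p2 b = true then (1 : Int) else 0)]
    unfold naS
    rw [sum_map_filter_ite]
    apply congrArg List.sum
    apply List.map_congr_left
    intro y _
    by_cases hy : p2 y = true <;> simp [hy]
  have hND : (l2.map (fun d => if p1 d = true then (1 : Int) else 0)).sum = ndS l2 p1 := by
    rw [sum_group l2 (fun d => if p1 d = true then (1 : Int) else 0)]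
    unfold ndS
    rw [sum_map_filter_ite]
    apply congrArg List.sum
    apply List.map_congr_left
    intro y _
    by_cases hy : p1 y = true <;> simp [hy]
  have hSP : (l2.map (fun d => if p1 d = true ∧ p2 d = true then (l1.count d : Int) else 0)).sum
      = spS l1 l2 p1 p2 := by
    rw [sum_group l2 (fun d => if p1 d = true ∧ p2 d = true then (l1.count d : Int) else 0)]
    unfold spS
    rw [sum_map_filter_ite]
    apply congrArg List.sum
    apply List.map_congr_left
    intro y _
    by_cases h1 : p1 y = true <;> by_cases h2 : p2 y = true <;> simp [h1, h2, mul_comm]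
  have hpt : ∀ b d : Int, (if b ≠ d ∧ p1 d = true ∧ p2 b = true then (1 : Int) else 0)
      = (if p1 d = true ∧ p2 b = true then (1 : Int) else 0)
        - (if b = d ∧ p1 d = true ∧ p2 b = true then (1 : Int) else 0) := by
    intro b d
    by_cases h1 : b = d <;> by_cases h2 : p1 d = true <;> by_cases h3 : p2 b = true <;>
      simp [h1, h2, h3]
  calc ttSum2 l1 l2 p1 p2
      = (l1.map (fun b => (l2.map (fun d => if p1 d = true ∧ p2 b = true then (1 : Int) else 0)).sum
          - (l2.map (fun d => if b = d ∧ p1 d = true ∧ p2 b = true then (1 : Int) else 0)).sum)).sum := by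
        unfold ttSum2
        apply congrArg List.sum
        apply List.map_congr_left
        intro b _
        rw [show (fun d => if b ≠ d ∧ p1 d = true ∧ p2 b = true then (1 : Int) else 0)
            = (fun d => (if p1 d = true ∧ p2 b = true then (1 : Int) else 0)
                - (if b = d ∧ p1 d = true ∧ p2 b = true then (1 : Int) else 0)) from funext (hpt b)]
        rw [sum_map_sub_int]
    _ = (l1.map (fun b => (l2.map (fun d => if p1 d = true ∧ p2 b = true then (1 : Int) else 0)).sum)).sum
        - (l1.map (fun b => (l2.map (fun d => if b = d ∧ p1 d = true ∧ p2 b = true then (1 : Int) else 0)).sum)).sum :=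
        sum_map_sub_int _ _ _
    _ = naS l1 p2 * ndS l2 p1 - spS l1 l2 p1 p2 := by
        congr 1
        · have h1 : ∀ b ∈ l1, (l2.map (fun d => if p1 d = true ∧ p2 b = true then (1 : Int) else 0)).sum
              = (l2.map (fun d => if p1 d = true then (1 : Int) else 0)).sum * (if p2 b = true then (1 : Int) else 0) := by
            intro b _
            by_cases hb : p2 b = true <;> simp [hb]
          rw [congrArg List.sum (List.map_congr_left h1), List.sum_map_mul_left, hNA, hND]
          ring
        · rw [sum_sum_comm]
          have h2 : ∀ d ∈ l2, (l1.map (fun b => if b = d ∧ p1 d = true ∧ p2 b = true then (1 : Int) else 0)).sum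
              = (if p1 d = true ∧ p2 d = true then (l1.count d : Int) else 0) := by
            intro d _
            have hp : ∀ b : Int, (if b = d ∧ p1 d = true ∧ p2 b = true then (1 : Int) else 0)
                = (if b = d then (if p1 d = true ∧ p2 d = true then (1 : Int) else 0) else 0) := by
              intro b
              by_cases hb : b = d
              · simp only [hb]
                by_cases hq : p1 d = true <;> by_cases hr : p2 d = true <;> simp [hq, hr]
              · simp [hb]
            rw [congrArg List.sum (List.map_congr_left (fun b _ => hp b)), sum_ite_eq_count]
            by_cases hq : p1 d = true ∧ p2 d = true <;> simp [hq]
          rw [congrArg List.sum (List.map_congr_left h2), hSP]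

-- ---- the inner accumulations of B ----

theorem fold1 {α : Type} (p : α → Bool) (f : α → Int) (l : List α) :
    ∀ (a : Int), l.foldl (fun s y => if p y = true then s + f y else s) a
      = a + ((l.filter p).map f).sum := by
  induction l with
  | nil => intro a; simp
  | cons y l ih =>
    intro a
    rw [List.foldl_cons, List.filter_cons]
    by_cases hy : p y = true
    · simp only [hy, if_true, ih]
      simp [add_assoc]
    · simp only [hy, if_false]
      rw [ih]
      simp [hy]

theorem fold2 {α : Type} (p q : α → Bool) (f g : α → Int) (l : List α) :
    ∀ (a b : Int), l.foldl (fun s y =>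
        if p y = true then (s.1 + f y, if q y = true then s.2 + g y else s.2) else s)
        ((a, b) : Int × Int)
      = (a + ((l.filter p).map f).sum, b + ((l.filter (fun y => p y && q y)).map g).sum) := by
  induction l with
  | nil => intro a b; simp
  | cons y l ih =>
    intro a b
    rw [List.foldl_cons, List.filter_cons, List.filter_cons]
    by_cases hy : p y = true
    · by_cases hz : q y = true
      · simp only [hy, hz, if_true, Bool.and_self, ih]
        simp [add_assoc]
      · simp only [hy, hz, if_true, ih]
        simp [add_assoc]
    · simp only [hy, if_false]
      rw [ih]
      simp [hy]

-- ---- A's grouped double sum and B's per-pair value ----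

def tFun (obj : List (List Int)) (x x' : Int) : Int :=
  (((obj.map bKey).filter (fun k => k.1 == x)).map (fun K =>
    (((obj.map bKey).filter (fun k => k.1 == x')).map (fun L => indI obj K L)).sum)).sum

def colFun (obj : List (List Int)) (x : Int) : PySem.Dict Int Int :=
  PySem.Dict.getD ((obj.map bKey).foldl colStep PySem.Dict.empty) x PySem.Dict.empty

def pFun (obj : List (List Int)) (x : Int) : Int → Bool :=
  fun y => PySem.Set.contains (PySem.Set.ofList obj) [x, y]

-- the body of B's inner loop over 'done', as a function of the two (x, column) pairs
def Fd (obj : List (List Int)) (xc1 xc2 : Int × PySem.Dict Int Int) : Int :=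
  let na := xc1.2.items.foldl (fun na ym =>
      if PySem.Set.contains (PySem.Set.ofList obj) [xc2.1, ym.1] = true then na + ym.2 else na) 0
  let nds := xc2.2.items.foldl (fun (nds : Int × Int) ym =>
      if PySem.Set.contains (PySem.Set.ofList obj) [xc1.1, ym.1] = true then
        (nds.1 + ym.2,
         if PySem.Set.contains (PySem.Set.ofList obj) [xc2.1, ym.1] = true then
           nds.2 + PySem.Dict.getD xc1.2 ym.1 0 * ym.2
         else nds.2)
      else nds) (0, 0)
  na * nds.1 - nds.2

def gFun (obj : List (List Int)) (x x' : Int) : Int :=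
  Fd obj (x, colFun obj x) (x', colFun obj x')

theorem pFun_iff (obj : List (List Int)) (x y : Int) :
    pFun obj x y = true ↔ [x, y] ∈ obj := by
  unfold pFun
  rw [PySem.Set.contains_iff, PySem.Set.mem_ofList]

theorem tFun_diag (obj : List (List Int)) (x : Int) : tFun obj x x = 0 := by
  unfold tFun
  apply List.sum_eq_zero
  intro a ha
  obtain ⟨K, hK, rfl⟩ := List.mem_map.mp ha
  apply List.sum_eq_zero
  intro b hb
  obtain ⟨L, hL, rfl⟩ := List.mem_map.mp hb
  have hK1 : K.1 = x := by simpa using (List.mem_filter.mp hK).2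
  have hL1 : L.1 = x := by simpa using (List.mem_filter.mp hL).2
  unfold indI
  rw [if_neg]
  rintro ⟨h1, -, -, -⟩
  exact h1 (hK1.trans hL1.symm)

theorem indI_comm (obj : List (List Int)) (K L : Int × Int) : indI obj K L = indI obj L K := by
  unfold indI
  apply if_congr ?_ rfl rfl
  constructor <;> rintro ⟨h1, h2, h3, h4⟩ <;> exact ⟨h1.symm, h2.symm, h4, h3⟩

theorem tFun_symm (obj : List (List Int)) (x x' : Int) : tFun obj x x' = tFun obj x' x := by
  unfold tFun
  rw [sum_sum_comm]
  apply congrArg List.sum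
  apply List.map_congr_left
  intro L _
  apply congrArg List.sum
  apply List.map_congr_left
  intro K _
  exact indI_comm obj K L

theorem gFun_eval (obj : List (List Int)) (x x' : Int) :
    gFun obj x x'
      = naS (ysOf (obj.map bKey) x) (pFun obj x')
          * ndS (ysOf (obj.map bKey) x') (pFun obj x)
        - spS (ysOf (obj.map bKey) x) (ysOf (obj.map bKey) x') (pFun obj x) (pFun obj x') := by
  unfold gFun Fd colFun
  simp only [cols_getD_counter]
  rw [PySem.Dict.items_counter, PySem.Dict.items_counter]
  simp only [List.foldl_map]
  rw [PySem.List.foldl_congr_mem (PySem.Set.ofList (ysOf (obj.map bKey) x)) _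
      (fun na y => if pFun obj x' y = true then na + ((ysOf (obj.map bKey) x).count y : Int) else na) 0
      (by
        intro acc y _
        simp [pFun])]
  rw [PySem.List.foldl_congr_mem (PySem.Set.ofList (ysOf (obj.map bKey) x')) _
      (fun (nds : Int × Int) y => if pFun obj x y = true then
          (nds.1 + ((ysOf (obj.map bKey) x').count y : Int),
           if pFun obj x' y = true then
             nds.2 + ((ysOf (obj.map bKey) x).count y : Int) * ((ysOf (obj.map bKey) x').count y : Int)
           else nds.2)
        else nds) (0, 0)
      (by
        intro acc y _
        simp [pFun, PySem.Dict.getD_counter])]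
  rw [fold1, fold2]
  unfold naS ndS spS
  simp

theorem tFun_eq_gFun (obj : List (List Int)) (x x' : Int) (h : x ≠ x') :
    tFun obj x x' = gFun obj x x' := by
  unfold tFun
  rw [gFun_eval, ← ttSum2_eq]
  rw [sum_over_fiber (obj.map bKey) x]
  unfold ttSum2
  apply congrArg List.sum
  apply List.map_congr_left
  intro b _
  rw [sum_over_fiber (obj.map bKey) x']
  apply congrArg List.sum
  apply List.map_congr_left
  intro d _
  unfold indI
  apply if_congr ?_ rfl rfl
  rw [pFun_iff, pFun_iff]
  constructor
  · rintro ⟨-, h2, h3, h4⟩; exact ⟨h2, h3, h4⟩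
  · rintro ⟨h2, h3, h4⟩; exact ⟨h, h2, h3, h4⟩

-- ---- putting the two sides together ----

theorem S_eq (obj : List (List Int)) :
    ((obj.map bKey).map (fun K => ((obj.map bKey).map (fun L => indI obj K L)).sum)).sum
      = ((PySem.Set.ofList ((obj.map bKey).map (fun k => k.1))).map (fun x =>
          ((PySem.Set.ofList ((obj.map bKey).map (fun k => k.1))).map (fun x' => tFun obj x x')).sum)).sum := by
  have hnd : (PySem.Set.ofList ((obj.map bKey).map (fun k => k.1))).Nodup := PySem.Set.nodup_ofList _
  have hmem : ∀ K ∈ (obj.map bKey), K.1 ∈ PySem.Set.ofList ((obj.map bKey).map (fun k => k.1)) := by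
    intro K hK
    rw [PySem.Set.mem_ofList]
    exact List.mem_map.mpr ⟨K, hK, rfl⟩
  rw [sum_fiber (fun k => k.1) _ _ hnd (obj.map bKey) hmem]
  apply congrArg List.sum
  apply List.map_congr_left
  intro x _
  calc (((obj.map bKey).filter (fun k => k.1 == x)).map (fun K => ((obj.map bKey).map (fun L => indI obj K L)).sum)).sum
      = (((obj.map bKey).filter (fun k => k.1 == x)).map (fun K =>
          ((PySem.Set.ofList ((obj.map bKey).map (fun k => k.1))).map (fun x' =>
            (((obj.map bKey).filter (fun k => k.1 == x')).map (fun L => indI obj K L)).sum)).sum)).sum := by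
        apply congrArg List.sum
        apply List.map_congr_left
        intro K _
        exact sum_fiber (fun k => k.1) _ _ hnd (obj.map bKey) hmem
    _ = _ := by
        rw [sum_sum_comm]
        rfl

theorem indI_nonneg (obj : List (List Int)) (K L : Int × Int) : 0 ≤ indI obj K L := by
  unfold indI; split_ifs <;> omega

theorem S_nonneg (obj : List (List Int)) :
    0 ≤ ((obj.map bKey).map (fun K => ((obj.map bKey).map (fun L => indI obj K L)).sum)).sum := by
  apply List.sum_nonneg
  intro a ha
  obtain ⟨K, -, rfl⟩ := List.mem_map.mp ha
  apply List.sum_nonneg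
  intro b hb
  obtain ⟨L, -, rfl⟩ := List.mem_map.mp hb
  exact indI_nonneg obj K L

theorem B_eval (obj : List (List Int)) :
    nr_Rectangles_alt obj = PySem.Int.floordiv
      (pairAcc (gFun obj) [] (PySem.Set.ofList ((obj.map bKey).map (fun k => k.1)))) 2 := by
  unfold nr_Rectangles_alt
  have hcols : (obj.foldl (fun cols p =>
        PySem.Dict.insert cols (PySem.List.pyGetD p 0 0)
          (PySem.Dict.insert (PySem.Dict.getD cols (PySem.List.pyGetD p 0 0) PySem.Dict.empty)
            (PySem.List.pyGetD p 1 0)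
            ((PySem.Dict.getD cols (PySem.List.pyGetD p 0 0) PySem.Dict.empty).getD (PySem.List.pyGetD p 1 0) 0 + 1)))
      PySem.Dict.empty)
      = (obj.map bKey).foldl colStep PySem.Dict.empty := by
    rw [List.foldl_map]
    rfl
  show PySem.Int.floordiv
    (((obj.foldl _ PySem.Dict.empty).items.foldl _ ((0, []) : Int × List (Int × PySem.Dict Int Int))).1) 2 = _
  rw [hcols]
  have hndk : (((obj.map bKey).foldl colStep PySem.Dict.empty).keys).Nodup := by
    unfold colStep
    exact PySem.Dict.nodup_keys_foldl_insert_key (obj.map bKey) (fun k => k.1) _ _ (by simp)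
  have hitems : ((obj.map bKey).foldl colStep PySem.Dict.empty).items
      = (PySem.Set.ofList ((obj.map bKey).map (fun k => k.1))).map
          (fun x => (x, colFun obj x)) := by
    rw [PySem.Dict.items_eq_map_keys _ hndk PySem.Dict.empty, cols_keys]
    rfl
  rw [hitems]
  rw [show (fun (st : Int × List (Int × PySem.Dict Int Int)) (xc2 : Int × PySem.Dict Int Int) =>
        (st.2.foldl (fun total xc1 =>
            let na := xc1.2.items.foldl (fun na ym =>
                if PySem.Set.contains (PySem.Set.ofList obj) [xc2.1, ym.1] = true then na + ym.2 else na) 0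
            let nds := xc2.2.items.foldl (fun (nds : Int × Int) ym =>
                if PySem.Set.contains (PySem.Set.ofList obj) [xc1.1, ym.1] = true then
                  (nds.1 + ym.2,
                   if PySem.Set.contains (PySem.Set.ofList obj) [xc2.1, ym.1] = true then
                     nds.2 + PySem.Dict.getD xc1.2 ym.1 0 * ym.2
                   else nds.2)
                else nds) (0, 0)
            total + (na * nds.1 - nds.2)) st.1,
         st.2 ++ [xc2]))
      = (fun (st : Int × List (Int × PySem.Dict Int Int)) xc2 =>
        (st.2.foldl (fun total xc1 => total + Fd obj xc1 xc2) st.1, st.2 ++ [xc2])) from rfl]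
  rw [foldl_pairAcc (Fd obj)]
  rw [show ([] : List (Int × PySem.Dict Int Int))
      = List.map (fun x => (x, colFun obj x)) [] from rfl]
  rw [pairAcc_map]
  rw [zero_add]
  rfl

theorem trunc_double (T : Int) (hT : 0 ≤ T) :
    PySem.Int.truncdiv (2 * T) 4 = PySem.Int.floordiv T 2 := by
  unfold PySem.Int.truncdiv PySem.Int.floordiv
  rw [Int.tdiv_eq_ediv, Int.fdiv_eq_ediv]
  have h1 : (0:Int) ≤ 2 * T ∨ (4:Int) ∣ 2 * T := Or.inl (by positivity)
  have h2 : (0:Int) ≤ 2 ∨ (2:Int) ∣ T := Or.inl (by norm_num)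
  simp only [h1, h2, if_pos]
  rw [show (4 : Int) = 2 * 2 by norm_num, Int.mul_ediv_mul_of_pos _ _ (by norm_num)]
  ring

-- ===== VERDICT (by name: the statement is the Claim_ definition above) =====
theorem nr_Rectangles_spec : Claim_equal_nr_Rectangles := by
  intro obj _hdom _hpre
  unfold Spec_nr_Rectangles
  rw [A_eval, B_eval obj]
  have h1 : (obj.map (fun p => (obj.map (fun q => indI obj (bKey p) (bKey q))).sum)).sum
      = ((obj.map bKey).map (fun K => ((obj.map bKey).map (fun L => indI obj K L)).sum)).sum := by
    simp only [List.map_map]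
    rfl
  rw [h1, S_eq]
  set X := PySem.Set.ofList (((obj.map bKey)).map (fun k => k.1)) with hX
  have hpc : pairAcc (gFun obj) [] X = pairAcc (tFun obj) [] X := by
    apply Eq.symm
    apply pairAcc_congr
    · simpa using PySem.Set.nodup_ofList _
    · intro a b hab
      exact tFun_eq_gFun obj a b hab
  rw [hpc, sum_sq_eq_two_pairAcc (tFun obj) (tFun_diag obj) (tFun_symm obj)]
  apply trunc_double
  have := S_nonneg obj
  rw [S_eq, sum_sq_eq_two_pairAcc (tFun obj) (tFun_diag obj) (tFun_symm obj), ← hX] at this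
  omega
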